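-- pv_equiv track=rewrite | github.com/LuZWCHA/MyLibs | nowandfuture/utils_medical/preproccess.py | get_position_by_index
-- ===== SOURCE A (Python) =====
-- from typing import Union, Optional, List, Tuple, AnyStr, Dict, Any, Callable
--
-- def get_position_by_index(index: int, sample_number_dims: Tuple) -> Tuple:
--     # sample plan:
--     """
--     For a dataset which sample count is N, each data will be cropped as M patches, each one is sampled from the
--     origin voxel at the index of (i, j, k). The up boundings of i, j, k are I, J, K that M = I * J * K
--     Now we have a patches dataset that size is N * M, just traverse it, and get a index 'x' (0 <= x < N * M)
--     for x, we get the sample index y = x % N, and to get the actual coordinate we need the upper bounding I, J, K.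
--     """
--     s = len(sample_number_dims)
--     if s == 1:
--         return (index,)
--
--     divs = []
--     cur: int = 1
--     for i in sample_number_dims[:-1]:
--         cur *= i
--         divs.append(cur)
--
--     res_indexs = []
--     cur = index
--     for i in reversed(divs):
--         idx = cur // i
--         cur = cur % i
--         res_indexs.append(idx)
--     res_indexs.append(cur)
--
--     return tuple(reversed(res_indexs))
-- ===== SOURCE B (Python) =====
-- def get_position_by_index(index: int, sample_number_dims):
--     coords = []
--     cur = index
--     for dim in sample_number_dims[:-1]:
--         cur, r = divmod(cur, dim)
--         coords.append(r)
--     coords.append(cur)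
--     return tuple(coords)
-- ===== Notes on version B (the rewrite author's own statement) =====
-- stated objective: simpler
-- what changed: Replaces A's two-pass scheme (build a cumulative-product table of dims[:-1], then divide/mod by it from the largest product down and reverse the result) with a single forward divmod pass that keeps one running quotient and emits each remainder in output order, dropping the table, the special s==1 case and both reversals.
-- outside the precondition, e.g. on get_position_by_index(13, (2, -1, 1)): A returns (1, -1, -7), B returns (1, 0, -6)
import Mathlib
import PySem

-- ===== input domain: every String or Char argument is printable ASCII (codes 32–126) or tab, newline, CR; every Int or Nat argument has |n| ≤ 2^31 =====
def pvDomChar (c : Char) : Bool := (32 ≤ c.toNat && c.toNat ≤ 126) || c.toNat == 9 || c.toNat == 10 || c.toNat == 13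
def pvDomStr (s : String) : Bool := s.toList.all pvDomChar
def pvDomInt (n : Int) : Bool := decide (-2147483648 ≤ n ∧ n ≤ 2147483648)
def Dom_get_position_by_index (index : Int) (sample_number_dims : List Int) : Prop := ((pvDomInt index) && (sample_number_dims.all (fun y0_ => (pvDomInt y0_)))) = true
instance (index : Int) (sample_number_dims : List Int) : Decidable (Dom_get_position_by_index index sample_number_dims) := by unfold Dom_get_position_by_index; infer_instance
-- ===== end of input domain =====

-- B replaces A's build-table-then-decompose-and-reverse scheme by a single forward divmod
-- pass (simpler, same O(n) cost); equivalence is proved for dims whose entries before the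
-- last are positive.

-- ===== PORT A =====
def get_position_by_index (index : Int) (sample_number_dims : List Int) : List Int :=
  let s : Int := (sample_number_dims.length : Int)
  if s = 1 then [index]
  else
    -- divs = []; cur = 1; for i in sample_number_dims[:-1]: cur *= i; divs.append(cur)
    let p1 := (PySem.List.slice sample_number_dims none (some (-1))).foldl
        (fun (p : List Int × Int) i => (p.1 ++ [p.2 * i], p.2 * i)) ([], 1)
    let divs := p1.1
    -- res_indexs = []; cur = index; for i in reversed(divs): idx = cur // i; cur = cur % i; append idx
    let p2 := divs.reverse.foldl
        (fun (p : List Int × Int) i => (p.1 ++ [PySem.Int.floordiv p.2 i], PySem.Int.mod p.2 i)) ([], index)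
    (p2.1 ++ [p2.2]).reverse

-- ===== PORT B =====
def get_position_by_index_alt (index : Int) (sample_number_dims : List Int) : List Int :=
  -- coords = []; cur = index; for dim in dims[:-1]: cur, r = divmod(cur, dim); coords.append(r)
  let p := (PySem.List.slice sample_number_dims none (some (-1))).foldl
      (fun (p : List Int × Int) dim => (p.1 ++ [PySem.Int.mod p.2 dim], PySem.Int.floordiv p.2 dim)) ([], index)
  p.1 ++ [p.2]

-- ===== PRECONDITION & SPEC =====
-- Pre_ excludes inputs with a nonpositive entry among dims[:-1]: a zero there makes A raise
-- ZeroDivisionError, and a negative "dimension size" is a meaningless extent on which A's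
-- table-quotient chain and B's progressive divmod yield two equally accidental tuples.
def Pre_get_position_by_index (index : Int) (sample_number_dims : List Int) : Prop :=
  ∀ i ∈ sample_number_dims.dropLast, 0 < i
instance (index : Int) (sample_number_dims : List Int) : Decidable (Pre_get_position_by_index index sample_number_dims) := by unfold Pre_get_position_by_index; infer_instance
def pvWitness_get_position_by_index : Int × List Int := (7, [2, 3, 4])

def Spec_get_position_by_index (index : Int) (sample_number_dims : List Int) (out : List Int) : Prop := out = get_position_by_index_alt index sample_number_dims
instance (index : Int) (sample_number_dims : List Int) (out : List Int) : Decidable (Spec_get_position_by_index index sample_number_dims out) := by unfold Spec_get_position_by_index; infer_instance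

-- ===== CLAIM (what is proved, stated in full; the proofs are below) =====
def Claim_equal_get_position_by_index : Prop := ∀ (index : Int) (sample_number_dims : List Int), Dom_get_position_by_index index sample_number_dims → Pre_get_position_by_index index sample_number_dims → Spec_get_position_by_index index sample_number_dims (get_position_by_index index sample_number_dims)

-- ===== LEMMAS AND PROOFS =====

-- recursive form of A's table loop
def pvDivs (c : Int) : List Int → List Int
  | [] => []
  | i :: t => (c * i) :: pvDivs (c * i) t

def pvLastProd (c : Int) : List Int → Int
  | [] => c
  | i :: t => pvLastProd (c * i) t

-- recursive form of A's decomposition loop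
def pvDecomp (cur : Int) : List Int → List Int × Int
  | [] => ([], cur)
  | i :: t =>
      let p := pvDecomp (PySem.Int.mod cur i) t
      (PySem.Int.floordiv cur i :: p.1, p.2)

-- recursive form of B's loop
def pvB (cur : Int) : List Int → List Int × Int
  | [] => ([], cur)
  | d :: t =>
      let p := pvB (PySem.Int.floordiv cur d) t
      (PySem.Int.mod cur d :: p.1, p.2)

theorem pvFoldlDivs (l : List Int) : ∀ (acc : List Int) (c : Int),
    l.foldl (fun (p : List Int × Int) i => (p.1 ++ [p.2 * i], p.2 * i)) (acc, c)
      = (acc ++ pvDivs c l, pvLastProd c l) := by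
  induction l with
  | nil => intro acc c; simp [pvDivs, pvLastProd]
  | cons i t ih => intro acc c; simp [pvDivs, pvLastProd, ih, List.append_assoc]

theorem pvFoldlDecomp (l : List Int) : ∀ (acc : List Int) (c : Int),
    l.foldl (fun (p : List Int × Int) i => (p.1 ++ [PySem.Int.floordiv p.2 i], PySem.Int.mod p.2 i)) (acc, c)
      = (acc ++ (pvDecomp c l).1, (pvDecomp c l).2) := by
  induction l with
  | nil => intro acc c; simp [pvDecomp]
  | cons i t ih => intro acc c; simp [pvDecomp, ih, List.append_assoc]

theorem pvFoldlB (l : List Int) : ∀ (acc : List Int) (c : Int),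
    l.foldl (fun (p : List Int × Int) dim => (p.1 ++ [PySem.Int.mod p.2 dim], PySem.Int.floordiv p.2 dim)) (acc, c)
      = (acc ++ (pvB c l).1, (pvB c l).2) := by
  induction l with
  | nil => intro acc c; simp [pvB]
  | cons i t ih => intro acc c; simp [pvB, ih, List.append_assoc]

theorem pvDivs_map (l : List Int) : ∀ (c d : Int), pvDivs (d * c) l = (pvDivs c l).map (fun g => d * g) := by
  induction l with
  | nil => intro c d; simp [pvDivs]
  | cons i t ih => intro c d; simp [pvDivs, mul_assoc, ih (c * i) d]

theorem pvDivs_pos (l : List Int) : ∀ (c : Int), 0 < c → (∀ i ∈ l, 0 < i) →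
    ∀ v ∈ pvDivs c l, 0 < v := by
  induction l with
  | nil => intro c _ _ v hv; simp [pvDivs] at hv
  | cons i t ih =>
      intro c hc hl v hv
      simp only [pvDivs, List.mem_cons] at hv
      have hi : 0 < i := hl i (by simp)
      rcases hv with h | h
      · subst h; positivity
      · exact ih (c * i) (by positivity) (fun j hj => hl j (by simp [hj])) v h

theorem pv_fdiv_fdiv (x d g : Int) (hd : 0 < d) (hg : 0 < g) :
    PySem.Int.floordiv (PySem.Int.floordiv x d) g = PySem.Int.floordiv x (d * g) := by
  rw [PySem.Int.floordiv_eq_ediv_of_pos hd, PySem.Int.floordiv_eq_ediv_of_pos hg,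
    PySem.Int.floordiv_eq_ediv_of_pos (by positivity)]
  exact Int.ediv_ediv_of_nonneg (le_of_lt hd)

theorem pv_mod_mul (x d g : Int) (hd : 0 < d) (hg : 0 < g) :
    PySem.Int.mod x (d * g) = d * PySem.Int.mod (PySem.Int.floordiv x d) g + PySem.Int.mod x d := by
  have hdg : (0:Int) < d * g := by positivity
  have hq : x / d / g = x / (d * g) := Int.ediv_ediv_of_nonneg (le_of_lt hd)
  rw [PySem.Int.mod_eq_emod_of_pos hdg, PySem.Int.mod_eq_emod_of_pos hg,
    PySem.Int.mod_eq_emod_of_pos hd, PySem.Int.floordiv_eq_ediv_of_pos hd,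
    Int.emod_def, Int.emod_def, Int.emod_def, ← hq]
  ring

theorem pv_fdiv_of_lt (a r d : Int) (hd : 0 < d) (h0 : 0 ≤ r) (h1 : r < d) :
    PySem.Int.floordiv (d * a + r) d = a := by
  rw [PySem.Int.floordiv_eq_ediv_of_pos hd, mul_comm d a, add_comm,
    Int.add_mul_ediv_right r a (ne_of_gt hd), Int.ediv_eq_zero_of_lt h0 h1]
  omega

theorem pv_mod_of_lt (a r d : Int) (hd : 0 < d) (h0 : 0 ≤ r) (h1 : r < d) :
    PySem.Int.mod (d * a + r) d = r := by
  rw [PySem.Int.mod_eq_emod_of_pos hd, mul_comm d a, add_comm]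
  simp [Int.emod_eq_of_lt h0 h1]

theorem pvDecomp_shift (d : Int) (hd : 0 < d) :
    ∀ (E : List Int), (∀ g ∈ E, 0 < g) → ∀ (x : Int),
      pvDecomp x (E.map (fun g => d * g) ++ [d])
        = ((pvDecomp (PySem.Int.floordiv x d) E).1 ++ [(pvDecomp (PySem.Int.floordiv x d) E).2],
           PySem.Int.mod x d) := by
  intro E
  induction E with
  | nil => intro _ x; simp [pvDecomp]
  | cons g t ih =>
      intro hpos x
      have hg : 0 < g := hpos g (by simp)
      have hmm := pv_mod_mul x d g hd hg
      have h0 : 0 ≤ PySem.Int.mod x d := PySem.Int.mod_nonneg x hd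
      have h1 : PySem.Int.mod x d < d := PySem.Int.mod_lt x hd
      have hq : PySem.Int.floordiv (PySem.Int.mod x (d * g)) d
          = PySem.Int.mod (PySem.Int.floordiv x d) g := by
        rw [hmm]; exact pv_fdiv_of_lt _ _ _ hd h0 h1
      have hr : PySem.Int.mod (PySem.Int.mod x (d * g)) d = PySem.Int.mod x d := by
        rw [hmm]; exact pv_mod_of_lt _ _ _ hd h0 h1
      simp only [List.map_cons, List.cons_append, pvDecomp]
      rw [ih (fun j hj => hpos j (by simp [hj])) (PySem.Int.mod x (d * g)), hq, hr,
        pv_fdiv_fdiv x d g hd hg]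

-- closed forms of the two ports
theorem pvA_closed (x : Int) (ds : List Int) :
    get_position_by_index x ds
      = if (ds.length : Int) = 1 then [x]
        else ((pvDecomp x ((pvDivs 1 ds.dropLast).reverse)).1
              ++ [(pvDecomp x ((pvDivs 1 ds.dropLast).reverse)).2]).reverse := by
  unfold get_position_by_index
  by_cases h : (ds.length : Int) = 1
  · simp [h]
  · simp only [h, if_false]
    rw [PySem.List.slice_to_neg_one, pvFoldlDivs, pvFoldlDecomp]
    simp

theorem pvB_closed (x : Int) (ds : List Int) :
    get_position_by_index_alt x ds = (pvB x ds.dropLast).1 ++ [(pvB x ds.dropLast).2] := by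
  unfold get_position_by_index_alt
  rw [PySem.List.slice_to_neg_one, pvFoldlB]
  simp

theorem pv_main : ∀ (ds : List Int) (x : Int), (∀ i ∈ ds.dropLast, 0 < i) →
    get_position_by_index x ds = get_position_by_index_alt x ds := by
  intro ds
  induction ds with
  | nil => intro x _; rw [pvA_closed, pvB_closed]; simp [pvDivs, pvDecomp, pvB]
  | cons d rest ih =>
      intro x hpos
      cases rest with
      | nil => rw [pvA_closed, pvB_closed]; simp [pvB]
      | cons e t =>
          have hd : 0 < d := hpos d (by simp)
          have hpos' : ∀ i ∈ (e :: t).dropLast, 0 < i := by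
            intro i hi
            exact hpos i (by simpa [List.dropLast] using Or.inr hi)
          have hDL : (d :: e :: t).dropLast = d :: (e :: t).dropLast := rfl
          -- divs for d :: rest
          have hdivs : pvDivs 1 ((d :: e :: t).dropLast)
              = d :: (pvDivs 1 ((e :: t).dropLast)).map (fun g => d * g) := by
            rw [hDL]
            show pvDivs 1 (d :: (e :: t).dropLast) = _
            have h' : pvDivs d ((e :: t).dropLast)
                = (pvDivs 1 ((e :: t).dropLast)).map (fun g => d * g) := by
              have h := pvDivs_map ((e :: t).dropLast) 1 d
              simpa using h
            simp [pvDivs, h']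
          have hposP : ∀ g ∈ (pvDivs 1 ((e :: t).dropLast)).reverse, 0 < g := by
            intro g hg
            exact pvDivs_pos _ 1 one_pos hpos' g (List.mem_reverse.mp hg)
          have hshift := pvDecomp_shift d hd ((pvDivs 1 ((e :: t).dropLast)).reverse) hposP x
          rw [pvA_closed, pvB_closed]
          have hlen : ¬ (((d :: e :: t).length : Int) = 1) := by simp; omega
          rw [if_neg hlen]
          rw [hdivs]
          have hrev : (d :: (pvDivs 1 ((e :: t).dropLast)).map (fun g => d * g)).reverse
              = ((pvDivs 1 ((e :: t).dropLast)).reverse.map (fun g => d * g)) ++ [d] := by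
            simp
          rw [hrev, hshift]
          -- now the A side is (Q.1 ++ [Q.2] ++ [x % d]).reverse
          have hA' : get_position_by_index (PySem.Int.floordiv x d) (e :: t)
              = ((pvDecomp (PySem.Int.floordiv x d) ((pvDivs 1 ((e :: t).dropLast)).reverse)).1
                 ++ [(pvDecomp (PySem.Int.floordiv x d) ((pvDivs 1 ((e :: t).dropLast)).reverse)).2]).reverse := by
            rw [pvA_closed]
            cases t with
            | nil => simp [pvDivs, pvDecomp]
            | cons u v => rw [if_neg (by simp; omega)]
          have hIH := ih (PySem.Int.floordiv x d) hpos'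
          rw [hA', pvB_closed] at hIH
          rw [hDL]
          show ((_ ++ [PySem.Int.mod x d]).reverse) = (pvB x (d :: (e :: t).dropLast)).1 ++ [(pvB x (d :: (e :: t).dropLast)).2]
          simp only [pvB]
          rw [List.reverse_append]
          simp only [List.reverse_cons, List.reverse_nil, List.nil_append, List.cons_append]
          rw [← hIH]

-- ===== VERDICT (by name: the statement is the Claim_ definition above) =====
theorem get_position_by_index_spec : Claim_equal_get_position_by_index := by
  intro index ds _ hpre
  unfold Spec_get_position_by_index
  exact pv_main ds index hpre
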